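-- pv_equiv track=rewrite | github.com/nathsara/cardiac_output_variability_repo | dpdt_data_script.py | r_peak_corrector
-- ===== SOURCE A (Python) =====
-- def r_peak_corrector(r_peak_timestamps, lvp_peaks_timestamps):
--     r_peaks = []
--
--     for rts_index in range(len(r_peak_timestamps)-1):
--         true_r_peak = False
--         curr_r_peak = r_peak_timestamps[rts_index]
--         next_r_peak = r_peak_timestamps[rts_index+1]
--
--         for lvpp_index in range(len(lvp_peaks_timestamps)):
--             curr_lvp_peak = lvp_peaks_timestamps[lvpp_index]
--             if curr_r_peak <= curr_lvp_peak <= next_r_peak: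
--                 true_r_peak = True
--
--         if true_r_peak:
--             r_peaks.append(r_peak_timestamps[rts_index])
--
--     return r_peaks
-- ===== SOURCE B (Python) =====
-- def r_peak_corrector(r_peak_timestamps, lvp_peaks_timestamps):
--     # Sort the LVP peaks once, then answer each interval query "is there an
--     # LVP peak in [curr, next]?" by binary search instead of a linear scan.
--     s = sorted(lvp_peaks_timestamps)
--
--     def bisect_left(a, x):
--         lo, hi = 0, len(a)
--         while lo < hi:
--             mid = (lo + hi) // 2
--             if a[mid] < x:
--                 lo = mid + 1
--             else:
--                 hi = mid
--         return lo
--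
--     out = []
--     for curr, nxt in zip(r_peak_timestamps, r_peak_timestamps[1:]):
--         j = bisect_left(s, curr)
--         if j < len(s) and s[j] <= nxt:
--             out.append(curr)
--     return out
-- ===== Notes on version B (the rewrite author's own statement) =====
-- stated objective: faster
-- what changed: Replaces the per-interval linear scan over all LVP peaks by sorting the LVP peaks once and answering each interval with a binary search (first LVP peak >= interval start, checked against the interval end), iterating adjacent R-peak pairs via zip instead of indices.
import Mathlib
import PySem

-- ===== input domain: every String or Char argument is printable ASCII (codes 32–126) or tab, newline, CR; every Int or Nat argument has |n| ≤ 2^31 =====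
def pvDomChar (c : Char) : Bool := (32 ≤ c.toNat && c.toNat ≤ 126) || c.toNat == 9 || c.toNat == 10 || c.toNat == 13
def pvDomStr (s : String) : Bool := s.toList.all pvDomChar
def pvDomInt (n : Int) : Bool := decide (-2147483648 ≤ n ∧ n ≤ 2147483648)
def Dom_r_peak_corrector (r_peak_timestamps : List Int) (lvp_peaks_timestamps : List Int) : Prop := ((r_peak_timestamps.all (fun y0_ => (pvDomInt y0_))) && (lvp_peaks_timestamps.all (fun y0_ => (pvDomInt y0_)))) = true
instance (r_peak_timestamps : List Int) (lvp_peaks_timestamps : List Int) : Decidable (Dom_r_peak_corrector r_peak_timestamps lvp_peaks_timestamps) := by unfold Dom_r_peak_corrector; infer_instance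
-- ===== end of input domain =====

-- B sorts the LVP peaks once and decides each R-R interval by binary search instead of A's per-interval linear scan.


-- ===== PORT A =====
-- Outer loop over rts_index in range(len(r)-1); indices rts_index and rts_index+1 are
-- always in range, so `getD _ 0` is exact. The inner loop over lvpp_index in
-- range(len(lvp)) reads exactly the elements of lvp in order: folded over lvp itself.
def r_peak_corrector (r_peak_timestamps : List Int) (lvp_peaks_timestamps : List Int) : List Int :=
  (List.range (r_peak_timestamps.length - 1)).foldl (fun r_peaks rts_index =>
    let curr_r_peak := r_peak_timestamps.getD rts_index 0
    let next_r_peak := r_peak_timestamps.getD (rts_index + 1) 0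
    let true_r_peak := lvp_peaks_timestamps.foldl
      (fun flag curr_lvp_peak =>
        if curr_r_peak ≤ curr_lvp_peak ∧ curr_lvp_peak ≤ next_r_peak then true else flag) false
    if true_r_peak then r_peaks ++ [curr_r_peak] else r_peaks) []

-- ===== PORT B =====
-- B's hand-written bisect_left is Python's standard bisect_left loop: ported as the
-- prelude's PySem.List.bisectLeft (the same algorithm). zip(r, r[1:]) = r.zip (r.drop 1).
-- In Python `j < len(s) and s[j] <= nxt` short-circuits, so s[j] is only read in range:
-- `getD j 0` is exact there.
def r_peak_corrector_alt (r_peak_timestamps : List Int) (lvp_peaks_timestamps : List Int) : List Int :=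
  let s := PySem.List.sorted lvp_peaks_timestamps (fun x => x) false
  (r_peak_timestamps.zip (r_peak_timestamps.drop 1)).foldl (fun out p =>
    let j := PySem.List.bisectLeft s p.1
    if j < s.length ∧ s.getD j 0 ≤ p.2 then out ++ [p.1] else out) []

-- ===== PRECONDITION & SPEC =====
def Spec_r_peak_corrector (r_peak_timestamps : List Int) (lvp_peaks_timestamps : List Int) (out : List Int) : Prop := out = r_peak_corrector_alt r_peak_timestamps lvp_peaks_timestamps
instance (r_peak_timestamps : List Int) (lvp_peaks_timestamps : List Int) (out : List Int) : Decidable (Spec_r_peak_corrector r_peak_timestamps lvp_peaks_timestamps out) := by unfold Spec_r_peak_corrector; infer_instance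

-- ===== CLAIM (what is proved, stated in full; the proofs are below) =====
def Claim_equal_r_peak_corrector : Prop := ∀ (r_peak_timestamps : List Int) (lvp_peaks_timestamps : List Int), Dom_r_peak_corrector r_peak_timestamps lvp_peaks_timestamps → Spec_r_peak_corrector r_peak_timestamps lvp_peaks_timestamps (r_peak_corrector r_peak_timestamps lvp_peaks_timestamps)

-- ===== LEMMAS AND PROOFS =====

-- A's inner flag loop is an existence test over lvp.
theorem flag_loop_eq_any (a b : Int) (lvp : List Int) (init : Bool) :
    lvp.foldl (fun flag x => if a ≤ x ∧ x ≤ b then true else flag) init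
      = (init || lvp.any (fun x => decide (a ≤ x ∧ x ≤ b))) := by
  induction lvp generalizing init with
  | nil => simp
  | cons y t ih =>
    simp only [List.foldl_cons, List.any_cons, ih]
    by_cases h : a ≤ y ∧ y ≤ b <;> simp [h]

theorem pairwise_getElem_mono (s : List Int) (h : List.Pairwise (fun x1 x2 => x1 ≤ x2) s)
    (j k : Nat) (hk : k < s.length) (hjk : j ≤ k) : s[j]'(lt_of_le_of_lt hjk hk) ≤ s[k] := by
  rcases Nat.lt_or_ge j k with hlt | hge
  · exact (List.pairwise_iff_getElem.mp h) j k _ hk hlt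
  · have : j = k := by omega
    subst this; rfl

-- B's bisect test on the sorted list decides the same existence over lvp.
theorem bisect_test_iff (lvp : List Int) (a b : Int) :
    (PySem.List.bisectLeft (PySem.List.sorted lvp (fun x => x) false) a
        < (PySem.List.sorted lvp (fun x => x) false).length ∧
      (PySem.List.sorted lvp (fun x => x) false).getD
        (PySem.List.bisectLeft (PySem.List.sorted lvp (fun x => x) false) a) 0 ≤ b)
      ↔ ∃ x ∈ lvp, a ≤ x ∧ x ≤ b := by
  set s := PySem.List.sorted lvp (fun x => x) false with hs
  have hpw : List.Pairwise (fun x1 x2 => x1 ≤ x2) s := PySem.List.sorted_pairwise lvp (fun x => x)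
  obtain ⟨hle, hlt, hge⟩ := PySem.List.bisectLeft_spec s a hpw
  set j := PySem.List.bisectLeft s a with hj
  have hmem : ∀ x, x ∈ s ↔ x ∈ lvp := fun x => (PySem.List.sorted_perm lvp (fun x => x) false).mem_iff
  constructor
  · rintro ⟨hjl, hsb⟩
    refine ⟨s[j], (hmem _).mp (List.getElem_mem hjl), hge j hjl le_rfl, ?_⟩
    simpa [List.getD, List.getElem?_eq_getElem hjl] using hsb
  · rintro ⟨x, hx, hax, hxb⟩
    obtain ⟨k, hk, hks⟩ := List.getElem_of_mem ((hmem x).mpr hx)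
    have hjk : j ≤ k := by
      by_contra h
      exact absurd (hks ▸ hlt k hk (by omega)) (not_lt.mpr hax)
    have hjl : j < s.length := lt_of_le_of_lt hjk hk
    have hmono : s[j]'hjl ≤ s[k] := pairwise_getElem_mono s hpw j k hk hjk
    refine ⟨hjl, ?_⟩
    simp only [List.getD, List.getElem?_eq_getElem hjl, Option.getD_some]
    exact le_trans hmono (hks ▸ hxb)

-- zip of adjacent pairs is the index view A uses.
theorem zip_adjacent_eq_map_range (r : List Int) :
    r.zip (r.drop 1) = (List.range (r.length - 1)).map
      (fun i => (r.getD i 0, r.getD (i + 1) 0)) := by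
  apply List.ext_getElem
  · simp [List.length_zip]
  · intro i h1 h2
    simp only [List.length_zip, List.length_drop] at h1
    have hi : i < r.length - 1 := by omega
    simp [List.getElem_zip, List.getElem_map, List.getElem_range, List.getD,
      List.getElem?_eq_getElem (show i < r.length by omega),
      List.getElem?_eq_getElem (show i + 1 < r.length by omega)]

theorem r_peak_corrector_spec : Claim_equal_r_peak_corrector := by
  intro r lvp _
  unfold Spec_r_peak_corrector r_peak_corrector r_peak_corrector_alt
  rw [zip_adjacent_eq_map_range, List.foldl_map]
  refine PySem.List.foldl_congr_mem _ _ _ _ ?_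
  intro acc i _
  simp only []
  rw [flag_loop_eq_any]
  simp only [Bool.false_or]
  have hflag : ((lvp.any fun x => decide (r.getD i 0 ≤ x ∧ x ≤ r.getD (i + 1) 0)) = true)
      ↔ ∃ x ∈ lvp, r.getD i 0 ≤ x ∧ x ≤ r.getD (i + 1) 0 := by
    simp [List.any_eq_true]
  by_cases h : ∃ x ∈ lvp, r.getD i 0 ≤ x ∧ x ≤ r.getD (i + 1) 0
  · rw [if_pos (hflag.mpr h), if_pos ((bisect_test_iff lvp _ _).mpr h)]
  · rw [if_neg (fun hc => h (hflag.mp hc)), if_neg (fun hc => h ((bisect_test_iff lvp _ _).mp hc))]
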